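-- pv_equiv track=rewrite | github.com/argonboron/PoSwithHMM | Practical2Part2.py | get_tagged_tuples
-- ===== SOURCE A (Python) =====
-- def get_tagged_tuples(data):
--     all_pairs = []
--     for sentence in data:
--         last_tag = 'START'
--         for pair in sentence:
--             all_pairs.append((last_tag, pair[1]))
--             last_tag = pair[1]
--         all_pairs.append((last_tag, 'END'))
--     return all_pairs
-- ===== SOURCE B (Python) =====
-- def get_tagged_tuples(data):
--     # Recursive decomposition: no accumulator, no zip; builds the result
--     # by structural recursion on the sentence list and on each sentence.
--     def sentence_transitions(prev, rest):
--         if not rest: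
--             return [(prev, 'END')]
--         tag = rest[0][1]
--         return [(prev, tag)] + sentence_transitions(tag, rest[1:])
--
--     if not data:
--         return []
--     return sentence_transitions('START', data[0]) + get_tagged_tuples(data[1:])
-- ===== Notes on version B (the rewrite author's own statement) =====
-- stated objective: alternative
-- what changed: B is a pure recursive decomposition: a helper recurses over each sentence emitting transitions, and the top level recurses over the sentence list concatenating results, instead of A's iterative double loop mutating an accumulator list with a running last_tag variable.
import Mathlib
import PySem

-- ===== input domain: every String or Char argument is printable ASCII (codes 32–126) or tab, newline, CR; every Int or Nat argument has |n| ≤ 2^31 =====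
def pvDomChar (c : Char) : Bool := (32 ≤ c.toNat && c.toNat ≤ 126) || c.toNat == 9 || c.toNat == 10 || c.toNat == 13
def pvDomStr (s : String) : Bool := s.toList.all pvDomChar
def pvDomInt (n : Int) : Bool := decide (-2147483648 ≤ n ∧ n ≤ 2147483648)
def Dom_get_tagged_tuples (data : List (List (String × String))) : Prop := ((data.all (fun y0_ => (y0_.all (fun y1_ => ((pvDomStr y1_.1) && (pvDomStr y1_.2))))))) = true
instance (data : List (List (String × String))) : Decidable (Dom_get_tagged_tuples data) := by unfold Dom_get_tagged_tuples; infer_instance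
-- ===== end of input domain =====

-- B replaces A's iterative double loop (accumulator list + running last_tag) by a pure recursive decomposition (alternative, same cost).

-- ===== PORT A =====
def get_tagged_tuples (data : List (List (String × String))) : List (String × String) :=
  data.foldl (fun all_pairs sentence =>
    let r := sentence.foldl
      (fun (st : List (String × String) × String) pair =>
        (st.1 ++ [(st.2, pair.2)], pair.2))
      (all_pairs, "START")
    r.1 ++ [(r.2, "END")]) []

-- ===== PORT B =====
-- helper: recursion over one sentence, carrying the previous tag
def sentence_transitions (prev : String) : List (String × String) → List (String × String)
  | [] => [(prev, "END")]
  | pair :: rest => (prev, pair.2) :: sentence_transitions pair.2 rest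

-- B: structural recursion over the sentence list, concatenating per-sentence results
def get_tagged_tuples_alt : List (List (String × String)) → List (String × String)
  | [] => []
  | s :: rest => sentence_transitions "START" s ++ get_tagged_tuples_alt rest

-- ===== PRECONDITION & SPEC =====
def Spec_get_tagged_tuples (data : List (List (String × String))) (out : List (String × String)) : Prop := out = get_tagged_tuples_alt data
instance (data : List (List (String × String))) (out : List (String × String)) : Decidable (Spec_get_tagged_tuples data out) := by unfold Spec_get_tagged_tuples; infer_instance

-- ===== CLAIM (what is proved, stated in full; the proofs are below) =====
def Claim_equal_get_tagged_tuples : Prop := ∀ (data : List (List (String × String))), Dom_get_tagged_tuples data → Spec_get_tagged_tuples data (get_tagged_tuples data)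

-- ===== LEMMAS AND PROOFS =====
lemma inner_eq (s : List (String × String)) (acc : List (String × String)) (last : String) :
    (let r := s.foldl (fun (st : List (String × String) × String) pair =>
        (st.1 ++ [(st.2, pair.2)], pair.2)) (acc, last)
     r.1 ++ [(r.2, "END")])
    = acc ++ sentence_transitions last s := by
  induction s generalizing acc last with
  | nil => simp [sentence_transitions]
  | cons p t ih =>
      simp only [List.foldl_cons, sentence_transitions]
      rw [ih]
      simp

lemma outer_eq (data : List (List (String × String))) (acc : List (String × String)) :
    data.foldl (fun all_pairs sentence =>
      let r := sentence.foldl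
        (fun (st : List (String × String) × String) pair =>
          (st.1 ++ [(st.2, pair.2)], pair.2))
        (all_pairs, "START")
      r.1 ++ [(r.2, "END")]) acc
    = acc ++ get_tagged_tuples_alt data := by
  induction data generalizing acc with
  | nil => simp [get_tagged_tuples_alt]
  | cons s rest ih =>
      simp only [List.foldl_cons, get_tagged_tuples_alt]
      rw [inner_eq, ih, List.append_assoc]

-- ===== VERDICT (by name: the statement is the Claim_ definition above) =====
theorem get_tagged_tuples_spec : Claim_equal_get_tagged_tuples := by
  intro data _
  show get_tagged_tuples data = get_tagged_tuples_alt data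
  unfold get_tagged_tuples
  rw [outer_eq]
  simp
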